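-- pv_equiv track=rewrite | github.com/epilectrik/voynich | phases/SHARED_COMPLEXITY/shared_complexity_test.py | build_middle_classifications
-- ===== SOURCE A (Python) =====
-- def build_middle_classifications(a_middles, b_middles):
--     """Build SHARED, A-EXCL, B-EXCL sets."""
--     a_set = set(a_middles.keys())
--     b_set = set(b_middles.keys())
--
--     shared = a_set & b_set
--     a_excl = a_set - b_set
--     b_excl = b_set - a_set
--
--     # Compute combined frequency for shared MIDDLEs
--     shared_freq = {m: a_middles[m] + b_middles[m] for m in shared}
--
--     return shared, a_excl, b_excl, shared_freq
-- ===== SOURCE B (Python) =====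
-- def build_middle_classifications(a_middles, b_middles):
--     """Hash-join both dicts into one annotated union map, then classify it in a single pass."""
--     merged = {k: (v, None) for k, v in a_middles.items()}
--     for k, v in b_middles.items():
--         merged[k] = (merged[k][0] if k in merged else None, v)
--     shared, a_excl, b_excl, shared_freq = set(), set(), set(), {}
--     for k, (av, bv) in merged.items():
--         if av is None:
--             b_excl.add(k)
--         elif bv is None:
--             a_excl.add(k)
--         else:
--             shared.add(k)
--             shared_freq[k] = av + bv
--     return shared, a_excl, b_excl, shared_freq
-- ===== Notes on version B (the rewrite author's own statement) =====
-- stated objective: alternative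
-- what changed: Replaces the three set-algebra operations plus a separate dict comprehension with a hash-join: both dicts are merged into one annotated union map keyed once (value = pair of optional a-value and b-value), and a single classification pass over that map reads only each key's annotation to build shared/a-excl/b-excl and the combined frequencies, with no cross-dict membership test during classification.
import Mathlib
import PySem

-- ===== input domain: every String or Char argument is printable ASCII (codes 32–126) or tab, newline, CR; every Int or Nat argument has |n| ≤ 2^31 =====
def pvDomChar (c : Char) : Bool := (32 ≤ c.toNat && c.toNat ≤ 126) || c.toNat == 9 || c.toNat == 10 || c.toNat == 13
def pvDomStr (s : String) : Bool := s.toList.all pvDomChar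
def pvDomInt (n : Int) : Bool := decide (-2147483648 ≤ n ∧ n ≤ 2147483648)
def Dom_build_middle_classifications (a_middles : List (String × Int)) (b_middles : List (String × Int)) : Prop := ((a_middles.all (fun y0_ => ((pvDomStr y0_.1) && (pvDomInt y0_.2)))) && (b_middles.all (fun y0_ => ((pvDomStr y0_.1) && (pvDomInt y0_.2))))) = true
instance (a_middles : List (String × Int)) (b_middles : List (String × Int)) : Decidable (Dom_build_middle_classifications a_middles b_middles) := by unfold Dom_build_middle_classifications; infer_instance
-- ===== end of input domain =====

-- B replaces A's set algebra + dict comprehension by a hash-join: one annotated union map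
-- (key -> (optional a-value, optional b-value)) built first, then one classification pass over it
-- (objective: alternative decomposition, same asymptotic cost).

-- ===== PORT A =====
-- dicts arrive as assoc lists; Python dict construction = PySem.Dict.ofList.
-- a_middles[m] / b_middles[m] in the comprehension: m ∈ shared guarantees the key is present,
-- so Dict.getD is exact there (no KeyError reachable).
def build_middle_classifications (a_middles : List (String × Int)) (b_middles : List (String × Int)) : List String × List String × List String × (List (String × Int)) :=
  let da := PySem.Dict.ofList a_middles
  let db := PySem.Dict.ofList b_middles
  let a_set : PySem.Set String := PySem.Set.ofList da.keys
  let b_set : PySem.Set String := PySem.Set.ofList db.keys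
  let shared := PySem.Set.inter a_set b_set
  let a_excl := PySem.Set.diff a_set b_set
  let b_excl := PySem.Set.diff b_set a_set
  let shared_freq := shared.foldl (fun d m => d.insert m (da.getD m 0 + db.getD m 0)) PySem.Dict.empty
  (shared, a_excl, b_excl, shared_freq.items)

-- ===== PORT B =====
-- merged = {k: (v, None) for k, v in a_middles.items()}
def pvMerge1 (m : PySem.Dict String (Option Int × Option Int)) (kv : String × Int) : PySem.Dict String (Option Int × Option Int) :=
  m.insert kv.1 (some kv.2, none)

-- merged[k] = (merged[k][0] if k in merged else None, v)
def pvMerge2 (m : PySem.Dict String (Option Int × Option Int)) (kv : String × Int) : PySem.Dict String (Option Int × Option Int) :=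
  m.insert kv.1 ((if m.contains kv.1 then (m.getD kv.1 (none, none)).1 else none), some kv.2)

-- the classification pass: if av is None: b_excl / elif bv is None: a_excl / else shared + freq
def pvClassify (st : PySem.Set String × PySem.Set String × PySem.Set String × PySem.Dict String Int)
    (kv : String × (Option Int × Option Int)) :
    PySem.Set String × PySem.Set String × PySem.Set String × PySem.Dict String Int :=
  match kv.2 with
  | (none, _) => (st.1, st.2.1, PySem.Set.add st.2.2.1 kv.1, st.2.2.2)
  | (some _, none) => (st.1, PySem.Set.add st.2.1 kv.1, st.2.2.1, st.2.2.2)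
  | (some av, some bv) => (PySem.Set.add st.1 kv.1, st.2.1, st.2.2.1, st.2.2.2.insert kv.1 (av + bv))

def build_middle_classifications_alt (a_middles : List (String × Int)) (b_middles : List (String × Int)) : List String × List String × List String × (List (String × Int)) :=
  let da := PySem.Dict.ofList a_middles
  let db := PySem.Dict.ofList b_middles
  let merged0 := da.items.foldl pvMerge1 PySem.Dict.empty
  let merged := db.items.foldl pvMerge2 merged0
  let res := merged.items.foldl pvClassify (PySem.Set.empty, PySem.Set.empty, PySem.Set.empty, PySem.Dict.empty)
  (res.1, res.2.1, res.2.2.1, res.2.2.2.items)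

-- ===== PRECONDITION & SPEC =====
def Spec_build_middle_classifications (a_middles : List (String × Int)) (b_middles : List (String × Int)) (out : List String × List String × List String × (List (String × Int))) : Prop := out = build_middle_classifications_alt a_middles b_middles
instance (a_middles : List (String × Int)) (b_middles : List (String × Int)) (out : List String × List String × List String × (List (String × Int))) : Decidable (Spec_build_middle_classifications a_middles b_middles out) := by unfold Spec_build_middle_classifications; infer_instance

-- ===== CLAIM (what is proved, stated in full; the proofs are below) =====
def Claim_equal_build_middle_classifications : Prop := ∀ (a_middles : List (String × Int)) (b_middles : List (String × Int)), Dom_build_middle_classifications a_middles b_middles → Spec_build_middle_classifications a_middles b_middles (build_middle_classifications a_middles b_middles)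

-- ===== LEMMAS AND PROOFS =====

-- first match by key in an assoc list (= dict lookup when keys are nodup)
def pvLookB (l : List (String × Int)) (k : String) : Option Int :=
  (l.find? (fun kv => kv.1 == k)).map Prod.snd

lemma pvLookB_nil (k : String) : pvLookB [] k = none := rfl

lemma pvLookB_cons (kv : String × Int) (t : List (String × Int)) (k : String) :
    pvLookB (kv :: t) k = if kv.1 == k then some kv.2 else pvLookB t k := by
  unfold pvLookB
  rw [List.find?_cons]
  by_cases h : kv.1 == k <;> simp [h]

lemma pvLookB_eq_none_of_not_mem (t : List (String × Int)) (k : String)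
    (h : k ∉ t.map Prod.fst) : pvLookB t k = none := by
  unfold pvLookB
  have hall : ∀ p ∈ t, ¬ ((p.1 == k) = true) := by
    intro p hp hpk
    have hpe : p.1 = k := by simpa using hpk
    exact h (hpe ▸ List.mem_map_of_mem hp)
  rw [List.find?_eq_none.mpr hall]
  rfl

lemma pvLookB_eq_get? (d : PySem.Dict String Int) (k : String) (hnd : d.keys.Nodup) :
    pvLookB d.items k = d.get? k := by
  unfold pvLookB
  cases h : d.items.find? (fun kv => kv.1 == k) with
  | none =>
    have hnm : k ∉ d.keys := by
      intro hk
      simp only [PySem.Dict.keys] at hk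
      obtain ⟨p, hp, hpk⟩ := List.mem_map.mp hk
      have := List.find?_eq_none.mp h p hp
      simp [hpk] at this
    simp [(PySem.Dict.get?_eq_none_iff_not_mem_keys d k).mpr hnm]
  | some p =>
    have hmem : p ∈ d.items := List.mem_of_find?_eq_some h
    have hpk : p.1 = k := by simpa using List.find?_some h
    have : d.get? k = some p.2 := by
      rw [← hpk]
      exact PySem.Dict.get?_of_mem_items d (by simpa using hmem) hnd
    simp [this]

-- characterization of the second merge pass
lemma pvMerge2_foldl :
    ∀ (l : List (String × Int)) (m : PySem.Dict String (Option Int × Option Int)),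
      (l.map Prod.fst).Nodup → m.keys.Nodup →
      (l.foldl pvMerge2 m).items =
        m.items.map (fun p => match pvLookB l p.1 with
          | some bv => (p.1, (p.2.1, some bv))
          | none => p)
        ++ (l.filter (fun kv => !m.contains kv.1)).map (fun kv => (kv.1, ((none : Option Int), some kv.2))) := by
  intro l
  induction l with
  | nil =>
    intro m _ _
    simp [pvLookB_nil]
  | cons kv t ih =>
    intro m hnd hm
    have hhd : kv.1 ∉ t.map Prod.fst := (List.nodup_cons.mp (by simpa using hnd)).1
    have htl : (t.map Prod.fst).Nodup := (List.nodup_cons.mp (by simpa using hnd)).2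
    simp only [List.foldl_cons, List.filter_cons]
    by_cases hc : m.contains kv.1 = true
    · -- overwrite in place
      have hstep : pvMerge2 m kv = m.insert kv.1 ((m.getD kv.1 (none, none)).1, some kv.2) := by
        simp [pvMerge2, hc]
      have hkeys : (pvMerge2 m kv).keys = m.keys := by
        rw [hstep]; exact PySem.Dict.keys_insert_of_contains _ _ hc
      have hitems : (pvMerge2 m kv).items =
          m.items.map (fun p => if p.1 == kv.1 then (kv.1, ((m.getD kv.1 (none, none)).1, some kv.2)) else p) := by
        rw [hstep]; exact PySem.Dict.items_insert_of_contains _ _ hc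
      rw [ih (pvMerge2 m kv) htl (hkeys ▸ hm), hitems]
      have hcont : ∀ x ∈ t, (pvMerge2 m kv).contains x.1 = m.contains x.1 := by
        intro x hx
        have hne : x.1 ≠ kv.1 := fun he => hhd (he ▸ List.mem_map_of_mem hx)
        rw [hstep, PySem.Dict.contains_insert]
        simp [hne]
      rw [List.filter_congr (fun x hx => by rw [hcont x hx])]
      simp only [hc, Bool.not_true, Bool.false_eq_true, if_false, List.map_map]
      congr 1
      refine List.map_congr_left ?_
      intro p hp
      simp only [Function.comp]
      by_cases hpk : p.1 = kv.1
      · have hLt : pvLookB t kv.1 = none := pvLookB_eq_none_of_not_mem t kv.1 hhd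
        have hgd : m.getD p.1 (none, none) = p.2 := PySem.Dict.getD_of_mem_items m (by simpa using hp) hm _
        simp [hpk, pvLookB_cons, hLt, ← hgd]
      · have hne : (kv.1 == p.1) = false := by simp [Ne.symm hpk]
        simp [hpk, pvLookB_cons, hne]
    · -- fresh append
      have hc' : m.contains kv.1 = false := by simpa using hc
      have hstep : pvMerge2 m kv = m.insert kv.1 (none, some kv.2) := by
        simp [pvMerge2, hc']
      have hitems : (pvMerge2 m kv).items = m.items ++ [(kv.1, ((none : Option Int), some kv.2))] := by
        rw [hstep]; exact PySem.Dict.items_insert_of_not_contains _ _ hc'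
      have hkeys : (pvMerge2 m kv).keys = m.keys ++ [kv.1] := by
        rw [hstep]; exact PySem.Dict.keys_insert_of_not_contains _ _ hc'
      have hknd : (pvMerge2 m kv).keys.Nodup := by
        rw [hkeys]
        refine List.Nodup.append hm (List.nodup_singleton _) ?_
        intro x hx hy
        have : x = kv.1 := by simpa using hy
        subst this
        exact absurd ((PySem.Dict.contains_iff_mem_keys _ _).mpr hx) (by simp [hc'])
      rw [ih (pvMerge2 m kv) htl hknd, hitems]
      have hcont : ∀ x ∈ t, (pvMerge2 m kv).contains x.1 = m.contains x.1 := by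
        intro x hx
        have hne : x.1 ≠ kv.1 := fun he => hhd (he ▸ List.mem_map_of_mem hx)
        rw [hstep, PySem.Dict.contains_insert]
        simp [hne]
      rw [List.filter_congr (fun x hx => by rw [hcont x hx])]
      simp only [hc', Bool.not_false, if_true, List.map_append, List.map_cons]
      have hLt : pvLookB t kv.1 = none := pvLookB_eq_none_of_not_mem t kv.1 hhd
      have hmap : ∀ p ∈ m.items,
          (fun p => match pvLookB t p.1 with
            | some bv => (p.1, (p.2.1, some bv))
            | none => p) p =
          (fun p => match pvLookB (kv :: t) p.1 with
            | some bv => (p.1, (p.2.1, some bv))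
            | none => p) p := by
        intro p hp
        have hpk : p.1 ∈ m.keys := PySem.Dict.mem_keys_of_mem_items m hp
        have hne : p.1 ≠ kv.1 := by
          intro he
          exact absurd ((PySem.Dict.contains_iff_mem_keys _ _).mpr (he ▸ hpk)) (by simp [hc'])
        have : (kv.1 == p.1) = false := by simp [Ne.symm hne]
        simp [pvLookB_cons, this]
      rw [List.map_congr_left hmap]
      simp [pvLookB_cons, hLt]

-- characterization of the classification pass
lemma pvClassify_foldl :
    ∀ (l : List (String × (Option Int × Option Int))) (s1 s2 s3 : List String) (fr : PySem.Dict String Int),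
      (l.map Prod.fst).Nodup →
      (∀ kv ∈ l, kv.1 ∉ s1 ∧ kv.1 ∉ s2 ∧ kv.1 ∉ s3 ∧ fr.contains kv.1 = false) →
      l.foldl pvClassify (s1, s2, s3, fr) =
        (s1 ++ (l.filter (fun kv => kv.2.1.isSome && kv.2.2.isSome)).map Prod.fst,
         s2 ++ (l.filter (fun kv => kv.2.1.isSome && !kv.2.2.isSome)).map Prod.fst,
         s3 ++ (l.filter (fun kv => !kv.2.1.isSome)).map Prod.fst,
         PySem.Dict.mk (fr.items ++ l.filterMap (fun kv => match kv.2 with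
           | (some av, some bv) => some (kv.1, av + bv)
           | _ => none))) := by
  intro l
  induction l with
  | nil => intro s1 s2 s3 fr _ _; simp
  | cons kv t ih =>
    intro s1 s2 s3 fr hnd hf
    have hhd : kv.1 ∉ t.map Prod.fst := (List.nodup_cons.mp (by simpa using hnd)).1
    have htl : (t.map Prod.fst).Nodup := (List.nodup_cons.mp (by simpa using hnd)).2
    obtain ⟨h1, h2, h3, h4⟩ := hf kv (List.mem_cons_self)
    have hfresh : ∀ y ∈ t, y.1 ≠ kv.1 := by
      intro y hy he; exact hhd (he ▸ List.mem_map_of_mem hy)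
    simp only [List.foldl_cons, List.filter_cons, List.filterMap_cons]
    obtain ⟨k, av, bv⟩ := kv
    match av, bv with
    | none, bv =>
      simp only [pvClassify, Option.isSome_none, Bool.false_and, Bool.false_eq_true, if_false,
        Bool.not_false, if_true]
      rw [PySem.Set.add_of_not_mem h3,
          ih s1 s2 (s3 ++ [k]) fr htl ?_]
      · simp
      · intro y hy
        obtain ⟨g1, g2, g3, g4⟩ := hf y (List.mem_cons_of_mem _ hy)
        refine ⟨g1, g2, ?_, g4⟩
        simp only [List.mem_append, List.mem_singleton]
        rintro (hs | he)
        · exact g3 hs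
        · exact hfresh y hy he
    | some a, none =>
      simp only [pvClassify, Option.isSome_some, Option.isSome_none, Bool.true_and, Bool.not_true,
        Bool.not_false, Bool.false_eq_true, if_false, if_true]
      rw [PySem.Set.add_of_not_mem h2,
          ih s1 (s2 ++ [k]) s3 fr htl ?_]
      · simp
      · intro y hy
        obtain ⟨g1, g2, g3, g4⟩ := hf y (List.mem_cons_of_mem _ hy)
        refine ⟨g1, ?_, g3, g4⟩
        simp only [List.mem_append, List.mem_singleton]
        rintro (hs | he)
        · exact g2 hs
        · exact hfresh y hy he
    | some a, some b =>
      simp only [pvClassify, Option.isSome_some, Bool.true_and, Bool.not_true, Bool.false_eq_true,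
        if_false, if_true]
      rw [PySem.Set.add_of_not_mem h1,
          ih (s1 ++ [k]) s2 s3 (fr.insert k (a + b)) htl ?_]
      · rw [PySem.Dict.items_insert_of_not_contains _ _ h4]
        simp
      · intro y hy
        obtain ⟨g1, g2, g3, g4⟩ := hf y (List.mem_cons_of_mem _ hy)
        refine ⟨?_, g2, g3, ?_⟩
        · simp only [List.mem_append, List.mem_singleton]
          rintro (hs | he)
          · exact g1 hs
          · exact hfresh y hy he
        · rw [PySem.Dict.contains_insert]
          simp [g4, hfresh y hy]

lemma pvDictContains_eq (d : PySem.Dict String Int) (k : String) :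
    d.contains k = d.keys.contains k := by
  rw [PySem.Dict.contains_eq_decide_mem_keys]
  simp

lemma pvFilterMapFst (l : List (String × Int)) (p : String → Bool) :
    (l.filter (fun kv => p kv.1)).map Prod.fst = (l.map Prod.fst).filter p := by
  have := List.filter_map (f := @Prod.fst String Int) (p := p) (l := l)
  simpa [Function.comp] using this.symm

lemma pvFilterMap_congr {α β : Type} :
    ∀ (l : List α) (f : α → Option β) (p : α → Bool) (g : α → β),
      (∀ x ∈ l, f x = if p x then some (g x) else none) →
      l.filterMap f = (l.filter p).map g := by
  intro l
  induction l with
  | nil => intro _ _ _ _; simp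
  | cons x t ih =>
    intro f p g h
    rw [List.filterMap_cons, List.filter_cons, h x (List.mem_cons_self)]
    by_cases hp : p x = true
    · simp only [hp, if_true, List.map_cons]
      rw [ih f p g (fun y hy => h y (List.mem_cons_of_mem _ hy))]
    · simp only [hp, Bool.false_eq_true, if_false]
      rw [ih f p g (fun y hy => h y (List.mem_cons_of_mem _ hy))]

theorem build_middle_classifications_spec_aux (a_middles b_middles : List (String × Int)) :
    build_middle_classifications a_middles b_middles = build_middle_classifications_alt a_middles b_middles := by
  unfold build_middle_classifications build_middle_classifications_alt
  simp only []
  set da := PySem.Dict.ofList a_middles with hda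
  set db := PySem.Dict.ofList b_middles with hdb
  have hka : da.keys.Nodup := PySem.Dict.nodup_keys_ofList a_middles
  have hkb : db.keys.Nodup := PySem.Dict.nodup_keys_ofList b_middles
  -- merged0
  have hm0 : (da.items.foldl pvMerge1 PySem.Dict.empty).items =
      da.items.map (fun kv => (kv.1, ((some kv.2 : Option Int), (none : Option Int)))) := by
    have := PySem.Dict.items_foldl_insert_fresh da.items Prod.fst
      (fun kv => ((some kv.2 : Option Int), (none : Option Int))) PySem.Dict.empty
      (fun a _ => PySem.Dict.contains_empty a.1) (by simpa using hka)
    simpa [pvMerge1, PySem.Dict.empty] using this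
  have hm0keys : (da.items.foldl pvMerge1 PySem.Dict.empty).keys = da.keys := by
    show ((da.items.foldl pvMerge1 PySem.Dict.empty).items.map Prod.fst) = da.items.map Prod.fst
    rw [hm0, List.map_map]
    exact List.map_congr_left (fun x _ => rfl)
  have hm0contains : ∀ k, (da.items.foldl pvMerge1 PySem.Dict.empty).contains k = da.contains k := by
    intro k
    rw [PySem.Dict.contains_eq_decide_mem_keys, PySem.Dict.contains_eq_decide_mem_keys, hm0keys]
  -- merged
  have hm : (db.items.foldl pvMerge2 (da.items.foldl pvMerge1 PySem.Dict.empty)).items =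
      da.items.map (fun kv => (kv.1, ((some kv.2 : Option Int), db.get? kv.1)))
      ++ (db.items.filter (fun kv => !da.contains kv.1)).map (fun kv => (kv.1, ((none : Option Int), some kv.2))) := by
    rw [pvMerge2_foldl db.items _ (by simpa using hkb) (hm0keys ▸ hka),
        List.filter_congr (fun x _ => by rw [hm0contains x.1]), hm0, List.map_map]
    congr 1
    refine List.map_congr_left ?_
    intro kv _
    simp only [Function.comp]
    rw [pvLookB_eq_get? db kv.1 hkb]
    cases db.get? kv.1 <;> rfl
  -- A's sets as filters
  rw [PySem.Set.ofList_eq_self_of_nodup da.keys hka, PySem.Set.ofList_eq_self_of_nodup db.keys hkb]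
  have hshared : PySem.Set.inter da.keys db.keys = da.keys.filter (fun k => db.contains k) := by
    show da.keys.filter (fun x => db.keys.contains x) = _
    exact List.filter_congr (fun x _ => (pvDictContains_eq db x).symm)
  have haexcl : PySem.Set.diff da.keys db.keys = da.keys.filter (fun k => !db.contains k) := by
    show da.keys.filter (fun x => !db.keys.contains x) = _
    exact List.filter_congr (fun x _ => by rw [pvDictContains_eq db x])
  have hbexcl : PySem.Set.diff db.keys da.keys = db.keys.filter (fun k => !da.contains k) := by
    show db.keys.filter (fun x => !da.keys.contains x) = _
    exact List.filter_congr (fun x _ => by rw [pvDictContains_eq da x])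
  -- B's classification pass
  have hmkeys : ((db.items.foldl pvMerge2 (da.items.foldl pvMerge1 PySem.Dict.empty)).items.map Prod.fst).Nodup := by
    rw [hm, List.map_append, List.map_map, List.map_map]
    have e1 : (da.items.map (Prod.fst ∘ fun kv => (kv.1, ((some kv.2 : Option Int), db.get? kv.1)))) = da.keys := by
      exact List.map_congr_left (fun x _ => rfl)
    have e2 : ((db.items.filter (fun kv => !da.contains kv.1)).map (Prod.fst ∘ fun kv => (kv.1, ((none : Option Int), some kv.2)))) = db.keys.filter (fun k => !da.contains k) := by
      have h1 : ((db.items.filter (fun kv => !da.contains kv.1)).map (Prod.fst ∘ fun kv => (kv.1, ((none : Option Int), some kv.2)))) = ((db.items.filter (fun kv => !da.contains kv.1)).map Prod.fst) := List.map_congr_left (fun x _ => rfl)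
      rw [h1, pvFilterMapFst db.items (fun k => !da.contains k)]
      rfl
    rw [e1, e2]
    refine List.Nodup.append hka (List.Nodup.filter _ hkb) ?_
    intro x hx hy
    have hxc : da.contains x = true := (PySem.Dict.contains_iff_mem_keys _ _).mpr hx
    have := (List.mem_filter.mp hy).2
    simp [hxc] at this
  rw [pvClassify_foldl _ PySem.Set.empty PySem.Set.empty PySem.Set.empty PySem.Dict.empty hmkeys
        (fun kv _ => ⟨List.not_mem_nil, List.not_mem_nil, List.not_mem_nil, PySem.Dict.contains_empty kv.1⟩)]
  simp only [hm, List.filter_append, List.filterMap_append, List.map_append]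
  have hbsome : ∀ k, (db.get? k).isSome = db.contains k := by
    intro k
    rw [PySem.Dict.contains_eq_isSome_get?]
  have hfa : (da.items.map (fun kv => (kv.1, ((some kv.2 : Option Int), db.get? kv.1)))).filter
      (fun kv => kv.2.1.isSome && kv.2.2.isSome) =
      (da.items.filter (fun kv => db.contains kv.1)).map (fun kv => (kv.1, ((some kv.2 : Option Int), db.get? kv.1))) := by
    rw [List.filter_map]
    congr 1
    exact List.filter_congr (fun x _ => by simp [Function.comp, hbsome])
  have hfb : (da.items.map (fun kv => (kv.1, ((some kv.2 : Option Int), db.get? kv.1)))).filter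
      (fun kv => kv.2.1.isSome && !kv.2.2.isSome) =
      (da.items.filter (fun kv => !db.contains kv.1)).map (fun kv => (kv.1, ((some kv.2 : Option Int), db.get? kv.1))) := by
    rw [List.filter_map]
    congr 1
    exact List.filter_congr (fun x _ => by simp [Function.comp, hbsome])
  have hfc : (da.items.map (fun kv => (kv.1, ((some kv.2 : Option Int), db.get? kv.1)))).filter
      (fun kv => !kv.2.1.isSome) = [] := by
    rw [List.filter_eq_nil_iff.mpr]
    intro x hx
    obtain ⟨y, hy, rfl⟩ := List.mem_map.mp hx
    simp
  have hga : ((db.items.filter (fun kv => !da.contains kv.1)).map (fun kv => (kv.1, ((none : Option Int), some kv.2)))).filter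
      (fun kv => kv.2.1.isSome && kv.2.2.isSome) = [] := by
    rw [List.filter_eq_nil_iff.mpr]
    intro x hx
    obtain ⟨y, hy, rfl⟩ := List.mem_map.mp hx
    simp
  have hgb : ((db.items.filter (fun kv => !da.contains kv.1)).map (fun kv => (kv.1, ((none : Option Int), some kv.2)))).filter
      (fun kv => kv.2.1.isSome && !kv.2.2.isSome) = [] := by
    rw [List.filter_eq_nil_iff.mpr]
    intro x hx
    obtain ⟨y, hy, rfl⟩ := List.mem_map.mp hx
    simp
  have hgc : ((db.items.filter (fun kv => !da.contains kv.1)).map (fun kv => (kv.1, ((none : Option Int), some kv.2)))).filter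
      (fun kv => !kv.2.1.isSome) =
      (db.items.filter (fun kv => !da.contains kv.1)).map (fun kv => (kv.1, ((none : Option Int), some kv.2))) := by
    rw [List.filter_eq_self.mpr]
    intro x hx
    obtain ⟨y, hy, rfl⟩ := List.mem_map.mp hx
    simp
  have hFa : (da.items.map (fun kv => (kv.1, ((some kv.2 : Option Int), db.get? kv.1)))).filterMap
      (fun kv => match kv.2 with
        | (some av, some bv) => some (kv.1, av + bv)
        | _ => none) =
      (da.items.filter (fun kv => db.contains kv.1)).map (fun kv => (kv.1, kv.2 + db.getD kv.1 0)) := by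
    rw [List.filterMap_map]
    refine pvFilterMap_congr da.items _ _ _ ?_
    intro kv _
    simp only [Function.comp]
    cases h : db.get? kv.1 with
    | none =>
      have : db.contains kv.1 = false := by rw [PySem.Dict.contains_eq_isSome_get?, h]; rfl
      simp [this]
    | some bv =>
      have hc : db.contains kv.1 = true := by rw [PySem.Dict.contains_eq_isSome_get?, h]; rfl
      have : db.getD kv.1 0 = bv := PySem.Dict.getD_of_get?_eq_some db 0 h
      simp [hc, this]
  have hFb : ((db.items.filter (fun kv => !da.contains kv.1)).map (fun kv => (kv.1, ((none : Option Int), some kv.2)))).filterMap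
      (fun kv => match kv.2 with
        | (some av, some bv) => some (kv.1, av + bv)
        | _ => none) = [] := by
    rw [List.filterMap_map, List.filterMap_eq_nil_iff.mpr]
    intro x _
    simp [Function.comp]
  rw [hfa, hfb, hfc, hga, hgb, hgc, hFa, hFb]
  -- A's frequency fold
  rw [hshared, haexcl, hbexcl]
  have hshnd : (da.keys.filter (fun k => db.contains k)).Nodup := List.Nodup.filter _ hka
  rw [PySem.Dict.items_foldl_insert_fresh (da.keys.filter (fun k => db.contains k))
        (fun m => m) (fun m => da.getD m 0 + db.getD m 0) PySem.Dict.empty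
        (fun m _ => PySem.Dict.contains_empty m) (by simpa using hshnd)]
  simp only [PySem.Dict.empty, PySem.Set.empty, List.map_nil, List.nil_append, List.map_map,
    List.append_nil]
  have ea : (da.items.filter (fun kv => db.contains kv.1)).map (Prod.fst ∘ fun kv => (kv.1, ((some kv.2 : Option Int), db.get? kv.1))) = da.keys.filter (fun k => db.contains k) := by
    have h1 : (da.items.filter (fun kv => db.contains kv.1)).map (Prod.fst ∘ fun kv => (kv.1, ((some kv.2 : Option Int), db.get? kv.1))) = (da.items.filter (fun kv => db.contains kv.1)).map Prod.fst := List.map_congr_left (fun x _ => rfl)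
    rw [h1, pvFilterMapFst da.items (fun k => db.contains k)]
    rfl
  have eb : (da.items.filter (fun kv => !db.contains kv.1)).map (Prod.fst ∘ fun kv => (kv.1, ((some kv.2 : Option Int), db.get? kv.1))) = da.keys.filter (fun k => !db.contains k) := by
    have h1 : (da.items.filter (fun kv => !db.contains kv.1)).map (Prod.fst ∘ fun kv => (kv.1, ((some kv.2 : Option Int), db.get? kv.1))) = (da.items.filter (fun kv => !db.contains kv.1)).map Prod.fst := List.map_congr_left (fun x _ => rfl)
    rw [h1, pvFilterMapFst da.items (fun k => !db.contains k)]
    rfl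
  have ec : (db.items.filter (fun kv => !da.contains kv.1)).map (Prod.fst ∘ fun kv => (kv.1, ((none : Option Int), some kv.2))) = db.keys.filter (fun k => !da.contains k) := by
    have h1 : (db.items.filter (fun kv => !da.contains kv.1)).map (Prod.fst ∘ fun kv => (kv.1, ((none : Option Int), some kv.2))) = (db.items.filter (fun kv => !da.contains kv.1)).map Prod.fst := List.map_congr_left (fun x _ => rfl)
    rw [h1, pvFilterMapFst db.items (fun k => !da.contains k)]
    rfl
  have ed : (da.items.filter (fun kv => db.contains kv.1)).map (fun kv => (kv.1, kv.2 + db.getD kv.1 0)) = (da.keys.filter (fun k => db.contains k)).map (fun m => (m, da.getD m 0 + db.getD m 0)) := by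
    have h1 : ((da.items.filter (fun kv => db.contains kv.1)).map Prod.fst).map (fun m => (m, da.getD m 0 + db.getD m 0)) = (da.keys.filter (fun k => db.contains k)).map (fun m => (m, da.getD m 0 + db.getD m 0)) := by
      rw [pvFilterMapFst da.items (fun k => db.contains k)]
      rfl
    rw [← h1, List.map_map]
    refine List.map_congr_left ?_
    intro kv hkv
    have hmem : kv ∈ da.items := List.mem_of_mem_filter hkv
    have hg : da.getD kv.1 0 = kv.2 := PySem.Dict.getD_of_mem_items da (by simpa using hmem) hka 0
    simp [Function.comp, hg]
  rw [ea, eb, ec, ed]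

-- ===== VERDICT (by name: the statement is the Claim_ definition above) =====
theorem build_middle_classifications_spec : Claim_equal_build_middle_classifications := by
  intro a_middles b_middles _
  exact build_middle_classifications_spec_aux a_middles b_middles
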